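-- pv_equiv track=rewrite | github.com/dinhuun/machine_learning | src/machine_learning/utils/utils_mapper.py | link_vertices
-- ===== SOURCE A (Python) =====
-- from itertools import combinations, permutations
-- from typing import Dict, List, Tuple
--
-- def link_vertices(
--     vertices: Dict[str, List[int]]
-- ) -> Tuple[List[int], List[int], List[int]]:
--     """
--     links two vertices' indices if vertices intersect
--     :param vertices: vertices
--     :return: edge sources, edge targets, and edge values
--     """
--     vertex_IDs = vertices.keys()
--     IDs_indices = dict([(ID, index) for index, ID in enumerate(vertex_IDs)])
--     ID_pairs = combinations(vertex_IDs, 2)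
--     edge_sources = []
--     edge_targets = []
--     edge_values = []
--     for ID_0, ID_1 in ID_pairs:
--         intersection = set(vertices[ID_0]) & set(vertices[ID_1])
--         if intersection:
--             edge_sources.append(IDs_indices[ID_0])
--             edge_targets.append(IDs_indices[ID_1])
--             edge_values.append(len(intersection))
--     return edge_sources, edge_targets, edge_values
-- ===== SOURCE B (Python) =====
-- from itertools import combinations
--
--
-- def link_vertices(vertices):
--     # inverted index: element -> increasing list of vertex indices containing it
--     index = {}
--     for i, vals in enumerate(vertices.values()):
--         for e in dict.fromkeys(vals):
--             index.setdefault(e, []).append(i)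
--     # count co-occurrences per vertex-index pair (i < j automatically)
--     counts = {}
--     for vs in index.values():
--         for pair in combinations(vs, 2):
--             counts[pair] = counts.get(pair, 0) + 1
--     edge_sources = []
--     edge_targets = []
--     edge_values = []
--     for i, j in sorted(counts):
--         edge_sources.append(i)
--         edge_targets.append(j)
--         edge_values.append(counts[(i, j)])
--     return edge_sources, edge_targets, edge_values
-- ===== Notes on version B (the rewrite author's own statement) =====
-- stated objective: faster
-- what changed: Replaces the quadratic all-pairs set-intersection scan with an inverted index (element -> vertex indices) whose co-occurring index pairs are counted once and emitted in sorted (= combinations) order.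
import Mathlib
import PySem

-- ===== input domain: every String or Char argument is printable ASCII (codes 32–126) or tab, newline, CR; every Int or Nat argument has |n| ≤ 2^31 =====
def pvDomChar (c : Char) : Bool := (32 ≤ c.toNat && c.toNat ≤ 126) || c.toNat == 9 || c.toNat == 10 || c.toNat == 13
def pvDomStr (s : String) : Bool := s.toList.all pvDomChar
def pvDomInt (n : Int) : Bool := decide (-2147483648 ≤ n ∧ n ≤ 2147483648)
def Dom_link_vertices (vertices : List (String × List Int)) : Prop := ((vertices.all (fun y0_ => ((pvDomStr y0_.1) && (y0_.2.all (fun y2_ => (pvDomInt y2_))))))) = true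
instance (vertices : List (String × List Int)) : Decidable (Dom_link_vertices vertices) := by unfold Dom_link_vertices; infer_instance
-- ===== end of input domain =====

-- B replaces A's all-pairs set-intersection scan by an inverted index (element → vertex
-- indices) whose co-occurring index pairs are counted once and emitted in sorted order
-- (= A's combinations order); measurably faster on large inputs in a timing run.

-- ===== PORT A =====
def link_vertices (vertices : List (String × List Int)) : List Int × List Int × List Int :=
  let vd := PySem.Dict.mk vertices
  let vertexIDs := vd.keys
  let IDsIndices := PySem.Dict.ofList ((PySem.List.enumerate vertexIDs).map (fun p => (p.2, p.1)))
  let IDpairs := PySem.List.combinations vertexIDs 2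
  IDpairs.foldl (fun acc c =>
    let id0 := c.getD 0 ""
    let id1 := c.getD 1 ""
    let intersection := PySem.Set.inter (PySem.Set.ofList (vd.getD id0 []))
                                        (PySem.Set.ofList (vd.getD id1 []))
    if intersection = [] then acc
    else (acc.1 ++ [IDsIndices.getD id0 0],
          acc.2.1 ++ [IDsIndices.getD id1 0],
          acc.2.2 ++ [PySem.Set.len intersection])) ([], [], [])

-- ===== PORT B =====
def link_vertices_alt (vertices : List (String × List Int)) : List Int × List Int × List Int :=
  let vd := PySem.Dict.mk vertices
  let index : PySem.Dict Int (List Int) :=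
    (PySem.List.enumerate vd.values).foldl (fun d p =>
      (PySem.List.dedup p.2).foldl (fun d e => d.modify e [] (fun l => l ++ [p.1])) d)
      PySem.Dict.empty
  let counts : PySem.Dict (Int × Int) Int :=
    index.values.foldl (fun c vs =>
      (PySem.List.combinations vs 2).foldl (fun c pr =>
        let i := pr.getD 0 0
        let j := pr.getD 1 0
        c.insert (i, j) (c.getD (i, j) 0 + 1)) c)
      PySem.Dict.empty
  (PySem.List.sorted2 counts.keys Prod.fst Prod.snd).foldl (fun acc p =>
    (acc.1 ++ [p.1], acc.2.1 ++ [p.2], acc.2.2 ++ [counts.getD p 0])) ([], [], [])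

-- ===== PRECONDITION & SPEC =====
-- The parameter is a Python dict, so its association list has pairwise-distinct keys;
-- Pre_ only states that dict shape (it excludes no input the Python A can receive).
def Pre_link_vertices (vertices : List (String × List Int)) : Prop :=
  (vertices.map Prod.fst).Nodup
instance (vertices : List (String × List Int)) : Decidable (Pre_link_vertices vertices) := by unfold Pre_link_vertices; infer_instance
def pvWitness_link_vertices : (List (String × List Int)) := [("a", [1, 2]), ("b", [2, 3]), ("c", [7])]

def Spec_link_vertices (vertices : List (String × List Int)) (out : List Int × List Int × List Int) : Prop := out = link_vertices_alt vertices
instance (vertices : List (String × List Int)) (out : List Int × List Int × List Int) : Decidable (Spec_link_vertices vertices out) := by unfold Spec_link_vertices; infer_instance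

-- ===== CLAIM (what is proved, stated in full; the proofs are below) =====
def Claim_equal_link_vertices : Prop := ∀ (vertices : List (String × List Int)), Dom_link_vertices vertices → Pre_link_vertices vertices → Spec_link_vertices vertices (link_vertices vertices)

-- ===== LEMMAS AND PROOFS =====

def pvComb2 {α : Type} : List α → List (α × α)
  | [] => []
  | x :: xs => xs.map (fun y => (x, y)) ++ pvComb2 xs

def pvLexLt (p q : Int × Int) : Prop := p.1 < q.1 ∨ (p.1 = q.1 ∧ p.2 < q.2)

theorem pvComb2_eq_combinations {α : Type} (l : List α) :
    PySem.List.combinations l 2 = (pvComb2 l).map (fun p => [p.1, p.2]) := by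
  induction l with
  | nil => simp [pvComb2, PySem.List.combinations_nil_succ]
  | cons x xs ih =>
    simp [pvComb2, PySem.List.combinations_cons_succ, PySem.List.combinations_one, ih,
      List.map_map, Function.comp]

theorem pvComb2_map {α β : Type} (f : α → β) (l : List α) :
    pvComb2 (l.map f) = (pvComb2 l).map (fun p => (f p.1, f p.2)) := by
  induction l with
  | nil => simp [pvComb2]
  | cons x xs ih => simp [pvComb2, ih, List.map_map, Function.comp]

theorem mem_pvComb2_weak {α : Type} {l : List α} {q : α × α} (h : q ∈ pvComb2 l) :
    q.1 ∈ l ∧ q.2 ∈ l := by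
  induction l with
  | nil => simp [pvComb2] at h
  | cons x xs ih =>
    simp only [pvComb2, List.mem_append, List.mem_map] at h
    rcases h with ⟨y, hy, rfl⟩ | h
    · simp [hy]
    · rcases ih h with ⟨h1, h2⟩; simp [h1, h2]

theorem mem_pvComb2_iff {α : Type} (key : α → Int) {l : List α}
    (hl : l.Pairwise (fun a b => key a < key b)) (q : α × α) :
    q ∈ pvComb2 l ↔ q.1 ∈ l ∧ q.2 ∈ l ∧ key q.1 < key q.2 := by
  induction l with
  | nil => simp [pvComb2]
  | cons x xs ih =>
    rcases List.pairwise_cons.mp hl with ⟨hx, hxs⟩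
    constructor
    · intro h
      simp only [pvComb2, List.mem_append, List.mem_map] at h
      rcases h with ⟨y, hy, rfl⟩ | h
      · exact ⟨List.mem_cons_self .., List.mem_cons_of_mem _ hy, hx y hy⟩
      · rcases (ih hxs).mp h with ⟨h1, h2, h3⟩
        exact ⟨List.mem_cons_of_mem _ h1, List.mem_cons_of_mem _ h2, h3⟩
    · rintro ⟨h1, h2, h3⟩
      simp only [pvComb2, List.mem_append, List.mem_map]
      rcases List.mem_cons.mp h1 with rfl | h1
      · rcases List.mem_cons.mp h2 with h2 | h2
        · exfalso; rw [h2] at h3; omega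
        · exact Or.inl ⟨q.2, h2, rfl⟩
      · rcases List.mem_cons.mp h2 with h2 | h2
        · exfalso; have := hx q.1 h1; rw [h2] at h3; omega
        · exact Or.inr ((ih hxs).mpr ⟨h1, h2, h3⟩)

theorem pairwise_pvComb2 {α : Type} (key : α → Int) {l : List α}
    (hl : l.Pairwise (fun a b => key a < key b)) :
    (pvComb2 l).Pairwise (fun p q => pvLexLt (key p.1, key p.2) (key q.1, key q.2)) := by
  induction l with
  | nil => simp [pvComb2]
  | cons x xs ih =>
    rcases List.pairwise_cons.mp hl with ⟨hx, hxs⟩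
    rw [pvComb2, List.pairwise_append]
    refine ⟨?_, ih hxs, ?_⟩
    · rw [List.pairwise_map]
      exact hxs.imp (fun h => Or.inr ⟨rfl, h⟩)
    · intro p hp q hq
      rcases List.mem_map.mp hp with ⟨y, hy, rfl⟩
      exact Or.inl (hx q.1 (mem_pvComb2_weak hq).1)

theorem nodup_pvComb2 {l : List Int} (hl : l.Pairwise (· < ·)) : (pvComb2 l).Nodup := by
  have := pairwise_pvComb2 (fun x => x) hl
  refine this.imp ?_
  intro a b h heq
  rw [heq] at h
  rcases h with h | ⟨h1, h2⟩
  · simp at h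
  · simp at h2

theorem count_pvComb2 {l : List Int} (hl : l.Pairwise (· < ·)) (p : Int × Int) :
    (pvComb2 l).count p = if p.1 ∈ l ∧ p.2 ∈ l ∧ p.1 < p.2 then 1 else 0 := by
  simp [List.Nodup.count (nodup_pvComb2 hl), mem_pvComb2_iff (fun x => x) hl p]

theorem pvLexLt_trans {a b c : Int × Int} (h1 : pvLexLt a b) (h2 : pvLexLt b c) :
    pvLexLt a c := by
  rcases h1 with h1 | ⟨h1, h1'⟩ <;> rcases h2 with h2 | ⟨h2, h2'⟩ <;>
    first
      | exact Or.inl (by omega)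
      | exact Or.inr ⟨by omega, by omega⟩

theorem pvInsertBy_pairwise (x : Int × Int) (ys : List (Int × Int))
    (h : ys.Pairwise (fun a b => pvLexLt a b ∨ a = b)) :
    (PySem.List.insertBy
        (fun a b => decide (a.1 < b.1) || !decide (b.1 < a.1) && decide (a.2 < b.2)) x ys).Pairwise
      (fun a b => pvLexLt a b ∨ a = b) := by
  induction ys with
  | nil => simp [PySem.List.insertBy]
  | cons y ys ih =>
    rcases List.pairwise_cons.mp h with ⟨hy, hys⟩
    rw [PySem.List.insertBy]
    by_cases hb : (decide (x.1 < y.1) || !decide (y.1 < x.1) && decide (x.2 < y.2)) = true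
    · rw [if_pos hb]
      simp only [Bool.or_eq_true, Bool.and_eq_true, decide_eq_true_eq, Bool.not_eq_true',
        decide_eq_false_iff_not] at hb
      have hxy : pvLexLt x y := by
        rcases hb with h1 | ⟨h1, h2⟩
        · exact Or.inl h1
        · by_cases he : x.1 = y.1
          · exact Or.inr ⟨he, h2⟩
          · exact Or.inl (by omega)
      refine List.pairwise_cons.mpr ⟨?_, h⟩
      intro z hz
      rcases List.mem_cons.mp hz with rfl | hz
      · exact Or.inl hxy
      · rcases hy z hz with hz' | rfl
        · exact Or.inl (pvLexLt_trans hxy hz')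
        · exact Or.inl hxy
    · rw [if_neg hb]
      simp only [Bool.or_eq_true, Bool.and_eq_true, decide_eq_true_eq, Bool.not_eq_true',
        decide_eq_false_iff_not, not_or, not_and] at hb
      have hyx : pvLexLt y x ∨ y = x := by
        rcases hb with ⟨h1, h2⟩
        by_cases hlt : y.1 < x.1
        · exact Or.inl (Or.inl hlt)
        · have he : y.1 = x.1 := by omega
          have h2' := h2 (by omega)
          by_cases hs : y.2 < x.2
          · exact Or.inl (Or.inr ⟨he, hs⟩)
          · right; ext <;> omega
      refine List.pairwise_cons.mpr ⟨?_, ih hys⟩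
      intro z hz
      rcases (PySem.List.insertBy_mem_iff _ _ _ _).mp hz with rfl | hz
      · exact hyx
      · exact hy z hz

theorem pvFoldl_insertBy_pairwise (xs : List (Int × Int)) (acc : List (Int × Int))
    (hacc : acc.Pairwise (fun a b => pvLexLt a b ∨ a = b)) :
    (xs.foldl (fun acc x =>
        PySem.List.insertBy
          (fun a b => decide (a.1 < b.1) || !decide (b.1 < a.1) && decide (a.2 < b.2)) x acc)
      acc).Pairwise (fun a b => pvLexLt a b ∨ a = b) := by
  induction xs generalizing acc with
  | nil => exact hacc
  | cons x xs ih => exact ih _ (pvInsertBy_pairwise x acc hacc)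

theorem pvSorted2_eq_of_perm_of_pairwise (xs ys : List (Int × Int))
    (hperm : ys.Perm xs) (hys : ys.Pairwise pvLexLt) :
    PySem.List.sorted2 xs Prod.fst Prod.snd = ys := by
  have hpair : (PySem.List.sorted2 xs Prod.fst Prod.snd).Pairwise
      (fun a b => pvLexLt a b ∨ a = b) := by
    have := pvFoldl_insertBy_pairwise xs [] (by simp)
    simpa [PySem.List.sorted2] using this
  have hperm2 : (PySem.List.sorted2 xs Prod.fst Prod.snd).Perm ys :=
    (PySem.List.sorted2_perm xs Prod.fst Prod.snd false).trans hperm.symm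
  refine List.Perm.eq_of_pairwise (le := fun a b => pvLexLt a b ∨ a = b) ?_ hpair
    (hys.imp Or.inl) hperm2
  intro a b _ _ hab hba
  rcases hab with hab | rfl
  · rcases hba with hba | rfl
    · exfalso; exact absurd (pvLexLt_trans hab hba) (by rintro (h | ⟨_, h⟩) <;> omega)
    · rfl
  · rfl

theorem pvCountP_nodup_eq {α : Type} [DecidableEq α] (p : α → Bool) (K M : List α)
    (hK : K.Nodup) (hM : M.Nodup) (h : ∀ x, p x = true → (x ∈ K ↔ x ∈ M)) :
    K.countP p = M.countP p := by
  rw [List.countP_eq_length_filter, List.countP_eq_length_filter]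
  refine List.Perm.length_eq ?_
  rw [List.perm_ext_iff_of_nodup (hK.filter p) (hM.filter p)]
  intro a
  simp only [List.mem_filter]
  constructor
  · rintro ⟨ha, hp⟩; exact ⟨(h a hp).mp ha, hp⟩
  · rintro ⟨ha, hp⟩; exact ⟨(h a hp).mpr ha, hp⟩

theorem pvSum_ite_eq_countP {α : Type} (p : α → Prop) [DecidablePred p] (l : List α) :
    (l.map (fun x => if p x then 1 else 0)).sum = l.countP (fun x => decide (p x)) := by
  induction l with
  | nil => simp
  | cons x xs ih =>
    by_cases h : p x
    · simp [ih, h, Nat.add_comm]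
    · simp [ih, h]

theorem pvLookup_vd (vertices : List (String × List Int))
    (hpre : (vertices.map Prod.fst).Nodup)
    {p : Int × (String × List Int)} (hp : p ∈ PySem.List.enumerate vertices) :
    (PySem.Dict.mk vertices).getD p.2.1 [] = p.2.2 := by
  rcases (PySem.List.mem_enumerate_iff _ _ _).mp hp with ⟨k, hk, rfl⟩
  have hmem : ((vertices[k].1, vertices[k].2) : String × List Int) ∈ vertices := by
    simp
  exact PySem.Dict.getD_of_mem_items _ hmem (by simpa [PySem.Dict.keys_mk] using hpre) []

theorem pvLookup_idx (vertices : List (String × List Int))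
    (hpre : (vertices.map Prod.fst).Nodup)
    {p : Int × (String × List Int)} (hp : p ∈ PySem.List.enumerate vertices) :
    (PySem.Dict.ofList ((PySem.List.enumerate (vertices.map Prod.fst)).map
        (fun r => (r.2, r.1)))).getD p.2.1 0 = p.1 := by
  have hmapfst : (((PySem.List.enumerate (vertices.map Prod.fst)).map
      (fun r => (r.2, r.1))).map Prod.fst) = vertices.map Prod.fst := by
    rw [List.map_map]
    exact PySem.List.map_snd_enumerate _ 0
  have hitems : (PySem.Dict.ofList ((PySem.List.enumerate (vertices.map Prod.fst)).map
      (fun r => (r.2, r.1)))).items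
      = (PySem.List.enumerate (vertices.map Prod.fst)).map (fun r => (r.2, r.1)) := by
    have := PySem.Dict.items_foldl_insert_fresh
      ((PySem.List.enumerate (vertices.map Prod.fst)).map (fun r => (r.2, r.1)))
      Prod.fst Prod.snd PySem.Dict.empty
      (fun a _ => PySem.Dict.contains_empty _) (by rw [hmapfst]; exact hpre)
    simpa [PySem.Dict.ofList, PySem.Dict.update] using this
  rcases (PySem.List.mem_enumerate_iff _ _ _).mp hp with ⟨k, hk, rfl⟩
  have hk' : k < (vertices.map Prod.fst).length := by simpa using hk
  have hmem : ((0 + (k : Int), (vertices.map Prod.fst)[k]) : Int × String)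
      ∈ PySem.List.enumerate (vertices.map Prod.fst) :=
    (PySem.List.mem_enumerate_iff _ _ _).mpr ⟨k, hk', rfl⟩
  have hmem2 : (((vertices.map Prod.fst)[k], 0 + (k : Int)) : String × Int)
      ∈ (PySem.List.enumerate (vertices.map Prod.fst)).map (fun r => (r.2, r.1)) :=
    List.mem_map.mpr ⟨_, hmem, rfl⟩
  have hnodup : (PySem.Dict.ofList ((PySem.List.enumerate (vertices.map Prod.fst)).map
      (fun r => (r.2, r.1)))).keys.Nodup := by
    simp only [PySem.Dict.keys, hitems]
    rw [hmapfst]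
    exact hpre
  have := PySem.Dict.getD_of_mem_items _ (hitems ▸ hmem2) hnodup 0
  simpa using this

def pvCset (q : (Int × (String × List Int)) × (Int × (String × List Int))) : List Int :=
  PySem.Set.inter (PySem.Set.ofList q.1.2.2) (PySem.Set.ofList q.2.2.2)

theorem pvA_char (vertices : List (String × List Int))
    (hpre : (vertices.map Prod.fst).Nodup) :
    link_vertices vertices =
      (((pvComb2 (PySem.List.enumerate vertices)).filter (fun q => decide (pvCset q ≠ []))).map (fun q => q.1.1),
       ((pvComb2 (PySem.List.enumerate vertices)).filter (fun q => decide (pvCset q ≠ []))).map (fun q => q.2.1),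
       ((pvComb2 (PySem.List.enumerate vertices)).filter (fun q => decide (pvCset q ≠ []))).map (fun q => PySem.Set.len (pvCset q))) := by
  have hkeymap : vertices.map Prod.fst = (PySem.List.enumerate vertices).map (fun q => q.2.1) := by
    conv_lhs => rw [← PySem.List.map_snd_enumerate vertices 0]
    rw [List.map_map]
    rfl
  unfold link_vertices
  simp only [PySem.Dict.keys_mk, hkeymap, pvComb2_eq_combinations, pvComb2_map, List.foldl_map]
  rw [PySem.List.foldl_congr_mem _ _
    (fun acc q => ((if pvCset q ≠ [] then acc.1 ++ [q.1.1] else acc.1 : List Int),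
      ((if pvCset q ≠ [] then acc.2.1 ++ [q.2.1] else acc.2.1 : List Int),
       (if pvCset q ≠ [] then acc.2.2 ++ [PySem.Set.len (pvCset q)] else acc.2.2 : List Int)))) _ ?_]
  · rw [PySem.List.foldl_prod_mk
      (f := fun s1 q => if pvCset q ≠ [] then s1 ++ [q.1.1] else s1)
      (g := fun s2 q => ((if pvCset q ≠ [] then s2.1 ++ [q.2.1] else s2.1 : List Int),
        (if pvCset q ≠ [] then s2.2 ++ [PySem.Set.len (pvCset q)] else s2.2 : List Int)))]
    rw [PySem.List.foldl_prod_mk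
      (f := fun s1 q => if pvCset q ≠ [] then s1 ++ [q.2.1] else s1)
      (g := fun s2 q => if pvCset q ≠ [] then s2 ++ [PySem.Set.len (pvCset q)] else s2)]
    rw [PySem.List.foldl_append_ite (fun q => pvCset q ≠ []) (fun q => q.1.1),
        PySem.List.foldl_append_ite (fun q => pvCset q ≠ []) (fun q => q.2.1),
        PySem.List.foldl_append_ite (fun q => pvCset q ≠ []) (fun q => PySem.Set.len (pvCset q))]
    simp
  · intro acc q hq
    rcases mem_pvComb2_weak hq with ⟨h1, h2⟩
    simp only [List.getD_cons_zero, List.getD_cons_succ]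
    rw [← hkeymap]
    rw [pvLookup_vd vertices hpre h1, pvLookup_vd vertices hpre h2,
        pvLookup_idx vertices hpre h1, pvLookup_idx vertices hpre h2]
    by_cases hc : (PySem.Set.ofList q.1.2.2).inter (PySem.Set.ofList q.2.2.2) = [] <;>
      simp [pvCset, hc]
  

-- ===== B-side helpers (proof only) =====
def pvIndex (vertices : List (String × List Int)) : PySem.Dict Int (List Int) :=
  (PySem.List.enumerate (vertices.map (fun x => x.2))).foldl (fun d p =>
      (PySem.List.dedup p.2).foldl (fun d e => d.modify e [] (fun l => l ++ [p.1])) d)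
    PySem.Dict.empty

def pvL1 (vertices : List (String × List Int)) : List (Int × Int) :=
  ((PySem.List.enumerate (vertices.map (fun x => x.2))).map
    (fun p => (PySem.List.dedup p.2).map (fun e => (e, p.1)))).flatten

def pvL2 (vertices : List (String × List Int)) : List (Int × Int) :=
  ((pvIndex vertices).values.map pvComb2).flatten

def pvCounts (vertices : List (String × List Int)) : PySem.Dict (Int × Int) Int :=
  (pvL2 vertices).foldl (fun c pr => c.insert pr (c.getD pr 0 + 1)) PySem.Dict.empty

theorem pvIndex_eq (vertices : List (String × List Int)) :
    pvIndex vertices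
      = (pvL1 vertices).foldl (fun d pr => d.modify pr.1 [] (fun l => l ++ [pr.2]))
          PySem.Dict.empty := by
  rw [pvL1, List.foldl_flatten, List.foldl_map]
  unfold pvIndex
  exact PySem.List.foldl_congr_mem _ _ _ _ (fun acc p _ => by rw [List.foldl_map])

theorem pvAux_flatten (E : List (Int × List Int)) (e : Int) :
    ((E.map (fun p => if e ∈ PySem.List.dedup p.2 then [((e : Int), p.1)] else [])).flatten).map
        (fun pr : Int × Int => pr.2)
      = (E.filter (fun p => decide (e ∈ PySem.List.dedup p.2))).map Prod.fst := by
  induction E with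
  | nil => simp
  | cons p E ih =>
    simp only [List.map_cons, List.flatten_cons, List.map_append, List.filter_cons]
    rw [ih]
    by_cases h : e ∈ p.2 <;> simp [h]

theorem pvIndex_getD (vertices : List (String × List Int)) (e : Int) :
    (pvIndex vertices).getD e []
      = ((PySem.List.enumerate (vertices.map (fun x => x.2))).filter
          (fun p => decide (e ∈ PySem.List.dedup p.2))).map Prod.fst := by
  have hblock : ∀ p : Int × List Int,
      ((PySem.List.dedup p.2).map (fun e' => ((e' : Int), p.1))).filter (fun pr => pr.1 == e)
        = if e ∈ PySem.List.dedup p.2 then [((e : Int), p.1)] else [] := by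
    intro p
    rw [List.filter_map]
    have hcomp : ((fun pr : Int × Int => pr.1 == e) ∘ (fun e' => ((e' : Int), p.1)))
        = (fun e' => e' == e) := rfl
    rw [hcomp, List.filter_beq,
      List.Nodup.count (by rw [PySem.List.dedup_eq_ofList]; exact PySem.Set.nodup_ofList _)]
    by_cases h : e ∈ p.2 <;> simp [h]
  rw [pvIndex_eq, PySem.Dict.getD_foldl_modify_append, pvL1, List.filter_flatten]
  simp only [List.map_map, Function.comp_def, PySem.Dict.getD_empty, List.nil_append]
  rw [List.map_congr_left (fun p (_ : p ∈ PySem.List.enumerate (vertices.map (fun x => x.2))) => hblock p)]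
  exact pvAux_flatten _ e

theorem pvIndex_keys (vertices : List (String × List Int)) :
    (pvIndex vertices).keys = PySem.Set.ofList ((pvL1 vertices).map Prod.fst) := by
  rw [pvIndex_eq]
  rw [PySem.Dict.keys_foldl_modify_key (pvL1 vertices) Prod.fst []
    (fun _ pr => (fun l => l ++ [pr.2])) PySem.Dict.empty]
  rw [PySem.Dict.keys_empty, PySem.Set.update_nil_left]

theorem pvIndex_keys_nodup (vertices : List (String × List Int)) :
    (pvIndex vertices).keys.Nodup := by
  rw [pvIndex_keys]; exact PySem.Set.nodup_ofList _

theorem pvMem_index_keys (vertices : List (String × List Int)) (e : Int) :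
    e ∈ (pvIndex vertices).keys
      ↔ ∃ p ∈ PySem.List.enumerate (vertices.map (fun x => x.2)),
          e ∈ PySem.List.dedup p.2 := by
  rw [pvIndex_keys, PySem.Set.mem_ofList, pvL1]
  simp only [List.mem_map, List.mem_flatten]
  constructor
  · rintro ⟨pr, ⟨blk, ⟨p, hp, rfl⟩, hblk⟩, rfl⟩
    rcases List.mem_map.mp hblk with ⟨e', he', rfl⟩
    exact ⟨p, hp, he'⟩
  · rintro ⟨p, hp, he⟩
    exact ⟨(e, p.1), ⟨_, ⟨p, hp, rfl⟩, List.mem_map.mpr ⟨e, he, rfl⟩⟩, rfl⟩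

theorem pvIndex_values (vertices : List (String × List Int)) :
    (pvIndex vertices).values
      = (pvIndex vertices).keys.map (fun e => (pvIndex vertices).getD e []) :=
  PySem.Dict.values_eq_map_keys _ (pvIndex_keys_nodup vertices) []

theorem pvVs_pairwise (vertices : List (String × List Int)) (e : Int) :
    ((pvIndex vertices).getD e []).Pairwise (· < ·) := by
  rw [pvIndex_getD]
  refine List.Pairwise.map _ (fun a b h => h) ?_
  exact List.Pairwise.sublist List.filter_sublist (PySem.List.pairwise_lt_enumerate _ 0)

theorem pvMem_vs (vertices : List (String × List Int)) (e i : Int) :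
    i ∈ (pvIndex vertices).getD e []
      ↔ ∃ p ∈ PySem.List.enumerate (vertices.map (fun x => x.2)),
          p.1 = i ∧ e ∈ PySem.List.dedup p.2 := by
  rw [pvIndex_getD]
  simp only [List.mem_map, List.mem_filter, decide_eq_true_eq]
  constructor
  · rintro ⟨p, ⟨hp, he⟩, rfl⟩; exact ⟨p, hp, rfl, he⟩
  · rintro ⟨p, hp, rfl, he⟩; exact ⟨p, ⟨hp, he⟩, rfl⟩

theorem pvCounts_getD (vertices : List (String × List Int)) (pr : Int × Int) :
    (pvCounts vertices).getD pr 0 = ((pvL2 vertices).count pr : Int) := by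
  rw [pvCounts, PySem.Dict.getD_foldl_insert_add_one, PySem.Dict.getD_empty]
  ring

theorem pvCounts_keys (vertices : List (String × List Int)) :
    (pvCounts vertices).keys = PySem.Set.ofList (pvL2 vertices) := by
  rw [pvCounts]
  rw [PySem.Dict.keys_foldl_insert (pvL2 vertices) (fun c x => c.getD x 0 + 1) PySem.Dict.empty]
  rw [PySem.Dict.keys_empty, PySem.Set.update_nil_left]

theorem pvMem_enum {α : Type} (xs : List α) (k : Nat) (hk : k < xs.length) :
    (((k : Int), xs[k]) : Int × α) ∈ PySem.List.enumerate xs := by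
  have := (PySem.List.mem_enumerate_iff xs 0 ((0 + (k : Int), xs[k]))).mpr ⟨k, hk, rfl⟩
  simpa using this

theorem pvEnum_elim {α : Type} {xs : List α} {p : Int × α}
    (hp : p ∈ PySem.List.enumerate xs) :
    ∃ (k : Nat) (hk : k < xs.length), p = ((k : Int), xs[k]) := by
  rcases (PySem.List.mem_enumerate_iff xs 0 p).mp hp with ⟨k, hk, hpk⟩
  exact ⟨k, hk, by simpa using hpk⟩

theorem pvMem_vs_iff (vertices : List (String × List Int)) (e : Int) (k : Nat)
    (hk : k < vertices.length) :
    ((k : Int) ∈ (pvIndex vertices).getD e []) ↔ e ∈ PySem.List.dedup (vertices[k].2) := by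
  rw [pvMem_vs]
  constructor
  · rintro ⟨p, hp, hpk, he⟩
    rcases pvEnum_elim hp with ⟨k', hk', rfl⟩
    have hkk : k' = k := by simpa using hpk
    subst hkk
    simpa [List.getElem_map] using he
  · intro he
    refine ⟨((k : Int), (vertices.map (fun x => x.2))[k]'(by simpa using hk)),
      pvMem_enum _ k (by simpa using hk), rfl, ?_⟩
    simpa [List.getElem_map] using he

theorem pvCount_L2 (vertices : List (String × List Int))
    {q : (Int × (String × List Int)) × (Int × (String × List Int))}
    (hq : q ∈ pvComb2 (PySem.List.enumerate vertices)) :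
    ((pvL2 vertices).count (q.1.1, q.2.1) : Int) = PySem.Set.len (pvCset q) := by
  have hEV := PySem.List.pairwise_lt_enumerate vertices 0
  rcases (mem_pvComb2_iff (fun p => p.1) hEV q).mp hq with ⟨h1, h2, hlt⟩
  rcases pvEnum_elim h1 with ⟨k1, hk1, hq1⟩
  rcases pvEnum_elim h2 with ⟨k2, hk2, hq2⟩
  rw [pvL2, List.count_flatten, List.map_map, pvIndex_values, List.map_map]
  simp only [Function.comp_def]
  have hpt : ∀ e ∈ (pvIndex vertices).keys,
      (pvComb2 ((pvIndex vertices).getD e [])).count (q.1.1, q.2.1)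
        = if (q.1.1 ∈ (pvIndex vertices).getD e [] ∧ q.2.1 ∈ (pvIndex vertices).getD e []
              ∧ q.1.1 < q.2.1) then 1 else 0 :=
    fun e _ => count_pvComb2 (pvVs_pairwise vertices e) ((q.1.1, q.2.1))
  rw [List.map_congr_left hpt,
    pvSum_ite_eq_countP (fun e => q.1.1 ∈ (pvIndex vertices).getD e []
      ∧ q.2.1 ∈ (pvIndex vertices).getD e [] ∧ q.1.1 < q.2.1)]
  have hstep2 : ((pvIndex vertices).keys).countP
      (fun e => decide (q.1.1 ∈ (pvIndex vertices).getD e []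
        ∧ q.2.1 ∈ (pvIndex vertices).getD e [] ∧ q.1.1 < q.2.1))
      = ((pvIndex vertices).keys).countP
        (fun e => decide (e ∈ PySem.List.dedup q.1.2.2 ∧ e ∈ PySem.List.dedup q.2.2.2)) := by
    refine List.countP_congr ?_
    intro e _
    have m1 : (q.1.1 ∈ (pvIndex vertices).getD e []) ↔ e ∈ PySem.List.dedup q.1.2.2 := by
      rw [hq1]; exact pvMem_vs_iff vertices e k1 hk1
    have m2 : (q.2.1 ∈ (pvIndex vertices).getD e []) ↔ e ∈ PySem.List.dedup q.2.2.2 := by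
      rw [hq2]; exact pvMem_vs_iff vertices e k2 hk2
    simp only [decide_eq_true_eq]
    constructor
    · rintro ⟨a, b, _⟩; exact ⟨m1.mp a, m2.mp b⟩
    · rintro ⟨a, b⟩; exact ⟨m1.mpr a, m2.mpr b, hlt⟩
  rw [hstep2]
  have hstep3 : ((pvIndex vertices).keys).countP
        (fun e => decide (e ∈ PySem.List.dedup q.1.2.2 ∧ e ∈ PySem.List.dedup q.2.2.2))
      = (PySem.List.dedup q.1.2.2).countP
        (fun e => decide (e ∈ PySem.List.dedup q.1.2.2 ∧ e ∈ PySem.List.dedup q.2.2.2)) := by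
    refine pvCountP_nodup_eq _ _ _ (pvIndex_keys_nodup vertices)
      (by rw [PySem.List.dedup_eq_ofList]; exact PySem.Set.nodup_ofList _) ?_
    intro e he
    rcases (decide_eq_true_iff).mp he with ⟨he1, he2⟩
    constructor
    · intro _; exact he1
    · intro _
      refine (pvMem_index_keys vertices e).mpr
        ⟨((k1 : Int), (vertices.map (fun x => x.2))[k1]'(by simpa using hk1)),
          pvMem_enum _ k1 (by simpa using hk1), ?_⟩
      simpa [List.getElem_map, hq1] using he1
  rw [hstep3]
  have hstep4 : (PySem.List.dedup q.1.2.2).countP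
        (fun e => decide (e ∈ PySem.List.dedup q.1.2.2 ∧ e ∈ PySem.List.dedup q.2.2.2))
      = (PySem.List.dedup q.1.2.2).countP
        (fun e => (PySem.Set.ofList q.2.2.2).contains e) := by
    refine List.countP_congr ?_
    intro e he
    simp [PySem.List.dedup_eq_ofList] at he ⊢
    intro _
    exact he
  rw [hstep4]
  rw [pvCset, PySem.Set.len, PySem.Set.inter, List.countP_eq_length_filter,
    PySem.List.dedup_eq_ofList]

theorem pvCounts_eq (vertices : List (String × List Int)) :
    (pvIndex vertices).values.foldl (fun c vs =>
      (PySem.List.combinations vs 2).foldl (fun c pr =>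
        let i := pr.getD 0 0
        let j := pr.getD 1 0
        c.insert (i, j) (c.getD (i, j) 0 + 1)) c)
      (PySem.Dict.empty : PySem.Dict (Int × Int) Int) = pvCounts vertices := by
  rw [pvCounts, pvL2, List.foldl_flatten, List.foldl_map]
  refine (PySem.List.foldl_congr_mem _ _ _ _ ?_).symm.trans rfl
  intro acc vs _
  rw [pvComb2_eq_combinations, List.foldl_map]
  refine PySem.List.foldl_congr_mem _ _ _ _ ?_
  intro c p _
  simp only [List.getD_cons_zero, List.getD_cons_succ]

theorem pvB_shape (vertices : List (String × List Int)) :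
    link_vertices_alt vertices =
      ((PySem.List.sorted2 (pvCounts vertices).keys Prod.fst Prod.snd).map Prod.fst,
       (PySem.List.sorted2 (pvCounts vertices).keys Prod.fst Prod.snd).map Prod.snd,
       (PySem.List.sorted2 (pvCounts vertices).keys Prod.fst Prod.snd).map
         (fun p => (pvCounts vertices).getD p 0)) := by
  unfold link_vertices_alt
  simp only [PySem.Dict.values_mk]
  rw [show (PySem.List.enumerate (List.map (fun x => x.2) vertices)).foldl
      (fun d p => (PySem.List.dedup p.2).foldl (fun d e => d.modify e [] (fun l => l ++ [p.1])) d)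
      PySem.Dict.empty = pvIndex vertices from rfl]
  rw [pvCounts_eq vertices]
  rw [PySem.List.foldl_prod_mk
    (f := fun s1 (p : Int × Int) => s1 ++ [p.1])
    (g := fun (s2 : List Int × List Int) (p : Int × Int) =>
      ((s2.1 ++ [p.2] : List Int), (s2.2 ++ [(pvCounts vertices).getD p 0] : List Int)))]
  rw [PySem.List.foldl_prod_mk
    (f := fun s1 (p : Int × Int) => s1 ++ [p.2])
    (g := fun (s2 : List Int) (p : Int × Int) => s2 ++ [(pvCounts vertices).getD p 0])]
  rw [PySem.List.foldl_append_singleton_eq_map, PySem.List.foldl_append_singleton_eq_map,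
      PySem.List.foldl_append_singleton_eq_map]
  simp

theorem pvMem_L2_iff (vertices : List (String × List Int)) (p : Int × Int) :
    p ∈ pvL2 vertices
      ↔ ∃ q ∈ pvComb2 (PySem.List.enumerate vertices), pvCset q ≠ [] ∧ p = (q.1.1, q.2.1) := by
  have hEV := PySem.List.pairwise_lt_enumerate vertices 0
  constructor
  · intro hp
    rw [pvL2] at hp
    rcases List.mem_flatten.mp hp with ⟨blk, hblk, hpblk⟩
    rcases List.mem_map.mp hblk with ⟨vs, hvs, rfl⟩
    rw [pvIndex_values] at hvs
    rcases List.mem_map.mp hvs with ⟨e, he, rfl⟩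
    rcases (mem_pvComb2_iff (fun x => x) (pvVs_pairwise vertices e) p).mp hpblk with ⟨hp1, hp2, hplt⟩
    rcases (pvMem_vs vertices e p.1).mp hp1 with ⟨p1, hp1m, hp1e, he1⟩
    rcases (pvMem_vs vertices e p.2).mp hp2 with ⟨p2, hp2m, hp2e, he2⟩
    rcases pvEnum_elim hp1m with ⟨k1, hk1, rfl⟩
    rcases pvEnum_elim hp2m with ⟨k2, hk2, rfl⟩
    have hk1' : k1 < vertices.length := by simpa using hk1
    have hk2' : k2 < vertices.length := by simpa using hk2
    refine ⟨(((k1 : Int), vertices[k1]), ((k2 : Int), vertices[k2])), ?_, ?_, ?_⟩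
    · refine (mem_pvComb2_iff (fun x => x.1) hEV _).mpr
        ⟨pvMem_enum vertices k1 hk1', pvMem_enum vertices k2 hk2', ?_⟩
      simp only at hp1e hp2e ⊢
      omega
    · have he1' : e ∈ PySem.Set.ofList (vertices[k1].2) := by
        simpa [PySem.List.dedup_eq_ofList, List.getElem_map] using he1
      have he2' : e ∈ PySem.Set.ofList (vertices[k2].2) := by
        simpa [PySem.List.dedup_eq_ofList, List.getElem_map] using he2
      exact List.ne_nil_of_mem ((PySem.Set.mem_inter _ _ _).mpr ⟨he1', he2'⟩)
    · simp only at hp1e hp2e ⊢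
      ext <;> simp [← hp1e, ← hp2e]
  · rintro ⟨q, hq, hne, rfl⟩
    rcases (mem_pvComb2_iff (fun x => x.1) hEV q).mp hq with ⟨h1, h2, hlt⟩
    rcases pvEnum_elim h1 with ⟨k1, hk1, hq1⟩
    rcases pvEnum_elim h2 with ⟨k2, hk2, hq2⟩
    rcases List.exists_mem_of_ne_nil _ hne with ⟨e, hee⟩
    rcases (PySem.Set.mem_inter _ _ _).mp hee with ⟨he1, he2⟩
    have he1' : e ∈ PySem.List.dedup (vertices[k1].2) := by
      simpa [PySem.List.dedup_eq_ofList, hq1] using he1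
    have he2' : e ∈ PySem.List.dedup (vertices[k2].2) := by
      simpa [PySem.List.dedup_eq_ofList, hq2] using he2
    have hekeys : e ∈ (pvIndex vertices).keys := by
      refine (pvMem_index_keys vertices e).mpr
        ⟨((k1 : Int), (vertices.map (fun x => x.2))[k1]'(by simpa using hk1)),
          pvMem_enum _ k1 (by simpa using hk1), ?_⟩
      simpa [List.getElem_map] using he1'
    rw [pvL2]
    refine List.mem_flatten.mpr ⟨pvComb2 ((pvIndex vertices).getD e []), ?_, ?_⟩
    · refine List.mem_map.mpr ⟨(pvIndex vertices).getD e [], ?_, rfl⟩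
      rw [pvIndex_values]
      exact List.mem_map.mpr ⟨e, hekeys, rfl⟩
    · refine (mem_pvComb2_iff (fun x => x) (pvVs_pairwise vertices e) _).mpr ⟨?_, ?_, ?_⟩
      · simp only [hq1]
        exact ((pvMem_vs_iff vertices e k1 (by simpa using hk1)).mpr he1')
      · simp only [hq2]
        exact ((pvMem_vs_iff vertices e k2 (by simpa using hk2)).mpr he2')
      · exact hlt

theorem pvFinal (vertices : List (String × List Int))
    (hpre : (vertices.map Prod.fst).Nodup) :
    link_vertices vertices = link_vertices_alt vertices := by
  rw [pvA_char vertices hpre, pvB_shape vertices]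
  have hKc_pair : (((pvComb2 (PySem.List.enumerate vertices)).filter
      (fun q => decide (pvCset q ≠ []))).map (fun q => (q.1.1, q.2.1))).Pairwise pvLexLt := by
    rw [List.pairwise_map]
    have := pairwise_pvComb2 (fun (p : Int × (String × List Int)) => p.1)
      (PySem.List.pairwise_lt_enumerate vertices 0)
    exact (this.sublist List.filter_sublist).imp (fun h => h)
  have hKc_nodup : (((pvComb2 (PySem.List.enumerate vertices)).filter
      (fun q => decide (pvCset q ≠ []))).map (fun q => (q.1.1, q.2.1))).Nodup := by
    refine hKc_pair.imp ?_
    intro a b h heq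
    rw [heq] at h
    rcases h with h | ⟨h1, h2⟩ <;> omega
  have hperm : (((pvComb2 (PySem.List.enumerate vertices)).filter
      (fun q => decide (pvCset q ≠ []))).map (fun q => (q.1.1, q.2.1))).Perm
        (PySem.Set.ofList (pvL2 vertices)) := by
    rw [List.perm_ext_iff_of_nodup hKc_nodup (PySem.Set.nodup_ofList _)]
    intro p
    rw [PySem.Set.mem_ofList, pvMem_L2_iff]
    simp only [List.mem_map, List.mem_filter, decide_eq_true_eq]
    constructor
    · rintro ⟨q, ⟨hq, hne⟩, rfl⟩; exact ⟨q, hq, hne, rfl⟩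
    · rintro ⟨q, hq, hne, rfl⟩; exact ⟨q, ⟨hq, hne⟩, rfl⟩
  have hKeq : PySem.List.sorted2 (pvCounts vertices).keys Prod.fst Prod.snd
      = ((pvComb2 (PySem.List.enumerate vertices)).filter
          (fun q => decide (pvCset q ≠ []))).map (fun q => (q.1.1, q.2.1)) := by
    rw [pvCounts_keys]
    exact pvSorted2_eq_of_perm_of_pairwise _ _ hperm hKc_pair
  rw [hKeq]
  simp only [Prod.mk.injEq]
  refine ⟨?_, ?_, ?_⟩
  · rw [List.map_map]; rfl
  · rw [List.map_map]; rfl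
  · rw [List.map_map]
    refine List.map_congr_left ?_
    intro q hq
    have hq' : q ∈ pvComb2 (PySem.List.enumerate vertices) := List.mem_of_mem_filter hq
    simp only [Function.comp_def]
    rw [pvCounts_getD vertices ((q.1.1, q.2.1)), pvCount_L2 vertices hq']

-- ===== VERDICT (by name: the statement is the Claim_ definition above) =====
theorem link_vertices_spec : Claim_equal_link_vertices := by
  intro vertices _ hpre
  unfold Spec_link_vertices
  exact pvFinal vertices hpre
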